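-- pv_equiv track=rewrite | github.com/yebeike/NeSy-Edge | experiments/rq123_e2e/build_e2e_scaled_benchmark.py | _window_for_block
-- ===== SOURCE A (Python) =====
-- from typing import Dict, List, Tuple
--
-- def _window_for_block(
--     lines_with_idx: List[Tuple[int, str]],
--     end_at_error_warn: bool = True,
-- ) -> List[str]:
--     """
--     Return list of log lines forming the window.
--     If end_at_error_warn: from start up to and including first line containing ERROR or WARN; else all.
--     """
--     if not lines_with_idx:
--         return []
--     out: List[str] = []
--     for _, line in lines_with_idx:
--         out.append(line)
--         if end_at_error_warn and ("ERROR" in line or "WARN" in line):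
--             break
--     return out
-- ===== SOURCE B (Python) =====
-- from typing import List, Tuple
--
-- def _window_for_block(
--     lines_with_idx: List[Tuple[int, str]],
--     end_at_error_warn: bool = True,
-- ) -> List[str]:
--     if not end_at_error_warn:
--         cutoff = len(lines_with_idx)
--     else:
--         cutoff = next(
--             (i + 1 for i, (_, line) in enumerate(lines_with_idx)
--              if "ERROR" in line or "WARN" in line),
--             len(lines_with_idx),
--         )
--     return [line for _, line in lines_with_idx[:cutoff]]
-- ===== Notes on version B (the rewrite author's own statement) =====
-- stated objective: alternative
-- what changed: B first computes the cutoff index (first line containing ERROR/WARN, or the full length) and then projects the prefix, instead of A's single append-and-break loop.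
import Mathlib
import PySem

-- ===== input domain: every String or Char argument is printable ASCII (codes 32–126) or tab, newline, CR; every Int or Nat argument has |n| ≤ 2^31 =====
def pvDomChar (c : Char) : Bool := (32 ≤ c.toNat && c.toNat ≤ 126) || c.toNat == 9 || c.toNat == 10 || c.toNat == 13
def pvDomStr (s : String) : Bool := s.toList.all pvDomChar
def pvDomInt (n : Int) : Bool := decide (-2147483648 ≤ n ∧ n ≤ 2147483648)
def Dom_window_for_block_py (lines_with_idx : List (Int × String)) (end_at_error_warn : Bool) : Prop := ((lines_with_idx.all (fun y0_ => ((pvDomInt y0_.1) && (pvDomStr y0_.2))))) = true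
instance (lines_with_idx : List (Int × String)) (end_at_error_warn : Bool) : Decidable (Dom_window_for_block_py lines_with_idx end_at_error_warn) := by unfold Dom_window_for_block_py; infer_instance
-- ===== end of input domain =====

-- B computes the ERROR/WARN cutoff index first and then projects the prefix, instead of A's append-and-break loop (alternative decomposition, same cost).


-- ===== PORT A =====
-- 'ERROR' in line or 'WARN' in line
def pvHit (line : String) : Bool :=
  PySem.Str.isIn "ERROR" line || PySem.Str.isIn "WARN" line

-- the for-loop with append and break
def pvLoopA (lines_with_idx : List (Int × String)) (end_at_error_warn : Bool) : List String :=
  match lines_with_idx with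
  | [] => []
  | (_, line) :: rest =>
      line :: (if end_at_error_warn && pvHit line then [] else pvLoopA rest end_at_error_warn)

def window_for_block_py (lines_with_idx : List (Int × String)) (end_at_error_warn : Bool) : List String :=
  if lines_with_idx = [] then [] else pvLoopA lines_with_idx end_at_error_warn

-- ===== PORT B =====
def window_for_block_py_alt (lines_with_idx : List (Int × String)) (end_at_error_warn : Bool) : List String :=
  let cutoff : Nat :=
    if !end_at_error_warn then lines_with_idx.length
    else ((lines_with_idx.findIdx? (fun p => pvHit p.2)).map (· + 1)).getD lines_with_idx.length
  (lines_with_idx.take cutoff).map Prod.snd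

-- ===== PRECONDITION & SPEC =====
def Spec_window_for_block_py (lines_with_idx : List (Int × String)) (end_at_error_warn : Bool) (out : List String) : Prop := out = window_for_block_py_alt lines_with_idx end_at_error_warn
instance (lines_with_idx : List (Int × String)) (end_at_error_warn : Bool) (out : List String) : Decidable (Spec_window_for_block_py lines_with_idx end_at_error_warn out) := by unfold Spec_window_for_block_py; infer_instance

-- ===== CLAIM (what is proved, stated in full; the proofs are below) =====
def Claim_equal_window_for_block_py : Prop := ∀ (lines_with_idx : List (Int × String)) (end_at_error_warn : Bool), Dom_window_for_block_py lines_with_idx end_at_error_warn → Spec_window_for_block_py lines_with_idx end_at_error_warn (window_for_block_py lines_with_idx end_at_error_warn)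

-- ===== LEMMAS AND PROOFS =====
theorem pvLoopA_eq_alt (l : List (Int × String)) (e : Bool) :
    pvLoopA l e = window_for_block_py_alt l e := by
  induction l with
  | nil => cases e <;> rfl
  | cons hd tl ih =>
      obtain ⟨i, line⟩ := hd
      cases e with
      | false =>
          simp [pvLoopA, window_for_block_py_alt] at ih ⊢
          exact ih
      | true =>
          by_cases h : pvHit line = true
          · simp [pvLoopA, window_for_block_py_alt, h, List.findIdx?_cons]
          · simp only [pvLoopA, window_for_block_py_alt, Bool.true_and, h,
              List.findIdx?_cons, ih, List.length_cons, Bool.not_true]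
            cases hfi : (tl.findIdx? (fun p => pvHit p.2)) with
            | none => simp
            | some k => simp [List.take_succ_cons]

theorem window_for_block_py_spec : Claim_equal_window_for_block_py := by
  intro l e _
  unfold Spec_window_for_block_py window_for_block_py
  split
  · subst l; cases e <;> rfl
  · exact pvLoopA_eq_alt l e
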